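-- pv_equiv track=rewrite | github.com/blubits/solutions | euler/py/39-integer-right-triangles.py | find_triplets_naive
-- ===== SOURCE A (Python) =====
-- from math import gcd, ceil
--
-- def A(m, n):
--     return (m ** 2) - (n ** 2)
--
-- def B(m, n):
--     return 2 * m * n
--
-- def C(m, n):
--     return (m ** 2) + (n ** 2)
--
-- def coprime(x, y, z):
--     return gcd(x, y) == 1 and gcd(y, z) == 1 and gcd(x, z) == 1
--
-- def find_triplets_naive(x):
--     # Runtime approx 3x^2
--     ans_a = []
--     ans_b = []
--     ans_c = []
--     # General algorithm: generate and iterate through all pairs of (m, n) up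
--     # until (x-1, x-1) and check if it can generate a valid triple per Euclid
--     # (1) Get (other side, hypotenuse) given (side)
--     for m in range(1, x):
--         for n in range(1, x):
--             at = A(m, n)
--             bt = B(m, n)
--             ct = C(m, n)
--             # We check if the gcd of all three numbers is equal to 1
--             # to prevent non-primitive triplets from getting into our
--             # answer
--             if at == x and coprime(x, bt, ct):
--                 ans_a.append((x, bt, ct))
--             # Since m^2 - n^2 can be negative, we check for signs here
--             if bt == x and at > 0 and coprime(at, x, ct):
--                 if x > at:
--                     ans_b.append((at, x, ct))
--                 else:
--                     ans_a.append((x, at, ct))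
--     # (2) Get (side, other side) given (hypotenuse)
--     for m in range(1, x):
--         for n in range(1, x):
--             at = A(m, n)
--             bt = B(m, n)
--             ct = C(m, n)
--             if ct == x and at > 0 and coprime(at, bt, x):
--                 ans_c.append((at, bt, x))
--     return ans_a + ans_b + ans_c
-- ===== SOURCE B (Python) =====
-- from math import gcd, isqrt
--
-- def coprime(x, y, z):
--     return gcd(x, y) == 1 and gcd(y, z) == 1 and gcd(x, z) == 1
--
-- def find_triplets_naive(x):
--     # Per m, solve Euclid's equations for n directly (perfect-square /
--     # divisibility tests) instead of scanning all n: O(x) gcd/isqrt steps.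
--     ans_a = []
--     ans_b = []
--     ans_c = []
--     for m in range(1, x):
--         mm = m * m
--         # (1a) n with m^2 - n^2 == x  ->  candidate triple (x, 2mn, m^2+n^2)
--         e1 = []
--         n1 = isqrt(mm - x) if mm > x else 0
--         if 1 <= n1 < x and n1 * n1 == mm - x and coprime(x, 2 * m * n1, mm + n1 * n1):
--             e1 = [(x, 2 * m * n1, mm + n1 * n1)]
--         # (1b) n with 2mn == x  ->  (m^2-n^2, x, m^2+n^2), ordered by size
--         e2 = []
--         n2 = x // (2 * m)
--         if 1 <= n2 < x and 2 * m * n2 == x: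
--             a2, c2 = mm - n2 * n2, mm + n2 * n2
--             if a2 > 0 and coprime(a2, x, c2):
--                 if x > a2:
--                     ans_b.append((a2, x, c2))
--                 else:
--                     e2 = [(x, a2, c2)]
--         # keep the order the n-scan would have produced
--         if e1 and e2 and n2 < n1:
--             ans_a += e2 + e1
--         else:
--             ans_a += e1 + e2
--         # (2) n with m^2 + n^2 == x  ->  (m^2-n^2, 2mn, x)
--         n3 = isqrt(x - mm) if x > mm else 0
--         if 1 <= n3 < x and n3 * n3 == x - mm:
--             a3, b3 = mm - n3 * n3, 2 * m * n3
--             if a3 > 0 and coprime(a3, b3, x):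
--                 ans_c.append((a3, b3, x))
--     return ans_a + ans_b + ans_c
-- ===== Notes on version B (the rewrite author's own statement) =====
-- stated objective: faster
-- what changed: Replaces the quadratic nested n-scan by solving Euclid's equations for n directly for each m (integer square root and divisibility tests), keeping the exact append order.
import Mathlib
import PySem

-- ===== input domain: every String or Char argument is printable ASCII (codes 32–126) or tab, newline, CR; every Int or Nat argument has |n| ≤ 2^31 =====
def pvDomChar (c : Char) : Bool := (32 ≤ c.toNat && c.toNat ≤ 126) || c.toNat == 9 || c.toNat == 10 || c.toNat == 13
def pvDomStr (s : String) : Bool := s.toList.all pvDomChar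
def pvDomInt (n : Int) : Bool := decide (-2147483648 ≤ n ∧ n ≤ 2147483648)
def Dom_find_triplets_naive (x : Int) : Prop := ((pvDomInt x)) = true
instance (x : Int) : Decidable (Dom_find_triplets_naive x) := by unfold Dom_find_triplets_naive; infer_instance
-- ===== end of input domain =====

-- B solves Euclid's equations for n directly per m (isqrt/divisibility tests) instead of scanning all n: asymptotically faster, same output.


-- ===== PORT A =====
def pyA (m n : Int) : Int := m ^ 2 - n ^ 2
def pyB (m n : Int) : Int := 2 * m * n
def pyC (m n : Int) : Int := m ^ 2 + n ^ 2
def pyCoprime (x y z : Int) : Bool := (Int.gcd x y == 1) && (Int.gcd y z == 1) && (Int.gcd x z == 1)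

def find_triplets_naive (x : Int) : List (List Int) :=
  let ab :=
    (PySem.List.pyRange 1 x 1).foldl (fun ab m =>
      (PySem.List.pyRange 1 x 1).foldl
        (fun (ab : List (List Int) × List (List Int)) n =>
          let at_ := pyA m n
          let bt := pyB m n
          let ct := pyC m n
          let ab := if at_ = x ∧ pyCoprime x bt ct = true then (ab.1 ++ [[x, bt, ct]], ab.2) else ab
          if bt = x ∧ at_ > 0 ∧ pyCoprime at_ x ct = true then
            if x > at_ then (ab.1, ab.2 ++ [[at_, x, ct]])
            else (ab.1 ++ [[x, at_, ct]], ab.2)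
          else ab)
        ab)
      (([], []) : List (List Int) × List (List Int))
  let ansc :=
    (PySem.List.pyRange 1 x 1).foldl (fun c m =>
      (PySem.List.pyRange 1 x 1).foldl
        (fun (c : List (List Int)) n =>
          let at_ := pyA m n
          let bt := pyB m n
          let ct := pyC m n
          if ct = x ∧ at_ > 0 ∧ pyCoprime at_ bt x = true then c ++ [[at_, bt, x]] else c)
        c)
      ([] : List (List Int))
  ab.1 ++ ab.2 ++ ansc

-- ===== PORT B =====
-- per-m named locals of Source B's loop body (n1, e1, n2, the (e2, ans_b-items) pair, n3, the ans_c item)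
def pvN1 (x m : Int) : Int := if m * m > x then ((m * m - x).toNat.sqrt : Int) else 0
def pvE1 (x m : Int) : List (List Int) :=
  if 1 ≤ pvN1 x m ∧ pvN1 x m < x ∧ pvN1 x m * pvN1 x m = m * m - x ∧
      pyCoprime x (2 * m * pvN1 x m) (m * m + pvN1 x m * pvN1 x m) = true
  then [[x, 2 * m * pvN1 x m, m * m + pvN1 x m * pvN1 x m]] else []
def pvN2 (x m : Int) : Int := PySem.Int.floordiv x (2 * m)
def pvBr2 (x m : Int) : List (List Int) × List (List Int) :=
  if 1 ≤ pvN2 x m ∧ pvN2 x m < x ∧ 2 * m * pvN2 x m = x then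
    let a2 := m * m - pvN2 x m * pvN2 x m
    let c2 := m * m + pvN2 x m * pvN2 x m
    if a2 > 0 ∧ pyCoprime a2 x c2 = true then
      if x > a2 then ([], [[a2, x, c2]]) else ([[x, a2, c2]], [])
    else ([], [])
  else ([], [])
def pvN3 (x m : Int) : Int := if x > m * m then ((x - m * m).toNat.sqrt : Int) else 0
def pvE3 (x m : Int) : List (List Int) :=
  if 1 ≤ pvN3 x m ∧ pvN3 x m < x ∧ pvN3 x m * pvN3 x m = x - m * m then
    let a3 := m * m - pvN3 x m * pvN3 x m
    let b3 := 2 * m * pvN3 x m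
    if a3 > 0 ∧ pyCoprime a3 b3 x = true then [[a3, b3, x]] else []
  else []
def pvAltBody (x m : Int) : List (List Int) × List (List Int) × List (List Int) :=
  let e1 := pvE1 x m
  let e2 := (pvBr2 x m).1
  let aadd := if e1 ≠ [] ∧ e2 ≠ [] ∧ pvN2 x m < pvN1 x m then e2 ++ e1 else e1 ++ e2
  (aadd, (pvBr2 x m).2, pvE3 x m)

def find_triplets_naive_alt (x : Int) : List (List Int) :=
  let s :=
    (PySem.List.pyRange 1 x 1).foldl
      (fun (s : List (List Int) × List (List Int) × List (List Int)) m =>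
        let d := pvAltBody x m
        (s.1 ++ d.1, s.2.1 ++ d.2.1, s.2.2 ++ d.2.2))
      ([], [], [])
  s.1 ++ s.2.1 ++ s.2.2

-- ===== PRECONDITION & SPEC =====
def Spec_find_triplets_naive (x : Int) (out : List (List Int)) : Prop := out = find_triplets_naive_alt x
instance (x : Int) (out : List (List Int)) : Decidable (Spec_find_triplets_naive x out) := by unfold Spec_find_triplets_naive; infer_instance

-- ===== CLAIM (what is proved, stated in full; the proofs are below) =====
def Claim_equal_find_triplets_naive : Prop := ∀ (x : Int), Dom_find_triplets_naive x → Spec_find_triplets_naive x (find_triplets_naive x)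

-- ===== LEMMAS AND PROOFS =====

-- per-(m,n) emissions of A's two scan loops (proof-side views of A's loop bodies)
def faA (x m n : Int) : List (List Int) :=
  (if pyA m n = x ∧ pyCoprime x (pyB m n) (pyC m n) = true then [[x, pyB m n, pyC m n]] else [])
    ++ (if pyB m n = x ∧ pyA m n > 0 ∧ pyCoprime (pyA m n) x (pyC m n) = true ∧ ¬ x > pyA m n then
          [[x, pyA m n, pyC m n]] else [])
def fbA (x m n : Int) : List (List Int) :=
  if pyB m n = x ∧ pyA m n > 0 ∧ pyCoprime (pyA m n) x (pyC m n) = true ∧ x > pyA m n then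
    [[pyA m n, x, pyC m n]] else []
def fcA (x m n : Int) : List (List Int) :=
  if pyC m n = x ∧ pyA m n > 0 ∧ pyCoprime (pyA m n) (pyB m n) x = true then
    [[pyA m n, pyB m n, x]] else []

-- generic loop shapes
theorem pv_foldl_pair {alpha : Type} (l : List Int) (fa fb : Int -> List alpha) (a b : List alpha) :
    l.foldl (fun p n => (p.1 ++ fa n, p.2 ++ fb n)) (a, b) = (a ++ l.flatMap fa, b ++ l.flatMap fb) := by
  induction l generalizing a b with
  | nil => simp
  | cons h t ih => simp [ih]

theorem pv_foldl_triple {alpha : Type} (l : List Int) (fa fb fc : Int -> List alpha)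
    (a b c : List alpha) :
    l.foldl (fun p n => (p.1 ++ fa n, p.2.1 ++ fb n, p.2.2 ++ fc n)) (a, b, c)
      = (a ++ l.flatMap fa, b ++ l.flatMap fb, c ++ l.flatMap fc) := by
  induction l generalizing a b c with
  | nil => simp
  | cons h t ih => simp [ih]

theorem pv_flatMap_single {beta : Type} (l : List Int) (hl : l.Pairwise (· < ·)) (k : Int)
    (t : List beta) (f : Int -> List beta) (hf : ∀ n ∈ l, f n = if n = k then t else []) :
    l.flatMap f = if k ∈ l then t else [] := by
  induction l with
  | nil => simp
  | cons a l ih =>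
    rcases List.pairwise_cons.mp hl with ⟨ha, hl'⟩
    by_cases hak : a = k
    · subst hak
      have hnil : l.flatMap f = [] := List.flatMap_eq_nil_iff.mpr (fun n hn => by
        rw [hf n (List.mem_cons_of_mem _ hn), if_neg (by have := ha n hn; omega)])
      simp [List.flatMap_cons, hnil, hf a (List.mem_cons_self)]
    · have := ih hl' (fun n hn => hf n (List.mem_cons_of_mem _ hn))
      simp only [List.flatMap_cons, hf a List.mem_cons_self, if_neg hak, List.nil_append, this]
      have hka : ¬ k = a := fun h => hak h.symm
      simp [List.mem_cons, hka]

theorem pv_flatMap_pair {beta : Type} (l : List Int) (hl : l.Pairwise (· < ·)) (k1 k2 : Int)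
    (hk : k1 ≤ k2) (t1 t2 : List beta) (f : Int -> List beta)
    (hf : ∀ n ∈ l, f n = (if n = k1 then t1 else []) ++ (if n = k2 then t2 else [])) :
    l.flatMap f = (if k1 ∈ l then t1 else []) ++ (if k2 ∈ l then t2 else []) := by
  induction l with
  | nil => simp
  | cons a l ih =>
    rcases List.pairwise_cons.mp hl with ⟨ha, hl'⟩
    by_cases h1 : a = k1 <;> by_cases h2 : a = k2
    · -- k1 = k2 = a
      subst h1; subst h2
      have hnil : l.flatMap f = [] := List.flatMap_eq_nil_iff.mpr (fun n hn => by
        rw [hf n (List.mem_cons_of_mem _ hn)]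
        have := ha n hn
        rw [if_neg (by omega), if_neg (by omega)]; rfl)
      simp [List.flatMap_cons, hnil, hf a List.mem_cons_self]
    · -- a = k1, a ≠ k2
      subst h1
      have hrest : l.flatMap f = if k2 ∈ l then t2 else [] := by
        apply pv_flatMap_single l hl' k2 t2
        intro n hn
        rw [hf n (List.mem_cons_of_mem _ hn), if_neg (by have := ha n hn; omega)]
        simp
      simp only [List.flatMap_cons, hf a List.mem_cons_self, if_pos rfl, if_neg h2,
        List.append_nil, hrest]
      have h2' : ¬ k2 = a := fun h => h2 h.symm
      simp [List.mem_cons, h2']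
    · -- a = k2, a ≠ k1
      subst h2
      have hnil : l.flatMap f = [] := List.flatMap_eq_nil_iff.mpr (fun n hn => by
        rw [hf n (List.mem_cons_of_mem _ hn)]
        have := ha n hn
        rw [if_neg (by omega), if_neg (by omega)]; rfl)
      have hk1 : k1 ∉ a :: l := by
        simp only [List.mem_cons]
        rintro (h | h)
        · exact h1 h.symm
        · have := ha _ h; omega
      simp [List.flatMap_cons, hnil, hf a List.mem_cons_self, h1, hk1]
    · have := ih hl' (fun n hn => hf n (List.mem_cons_of_mem _ hn))
      simp only [List.flatMap_cons, hf a List.mem_cons_self, if_neg h1, if_neg h2,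
        List.nil_append, this]
      have h1' : ¬ k1 = a := fun h => h1 h.symm
      have h2' : ¬ k2 = a := fun h => h2 h.symm
      simp [List.mem_cons, h1', h2']

-- arithmetic keys
theorem pv_sqrt_key {n d : Int} (hn : 1 ≤ n) (hd : d = n * n) : ((d.toNat.sqrt : Nat) : Int) = n := by
  subst hd
  have h0 : (0:Int) ≤ n := by omega
  rw [Int.toNat_mul h0 h0, Nat.sqrt_eq]
  omega

theorem pv_fd_key {m n x : Int} (hm : 1 ≤ m) (h : 2 * m * n = x) :
    PySem.Int.floordiv x (2 * m) = n := by
  rw [PySem.Int.floordiv_eq_ediv_of_pos (by omega), ← h, Int.mul_ediv_cancel_left _ (by omega)]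

-- pointwise indicator forms of A's conditions over the scanned range
theorem pv_hf1 (x m : Int) : ∀ n ∈ PySem.List.pyRange 1 x 1,
    (if pyA m n = x ∧ pyCoprime x (pyB m n) (pyC m n) = true then
        [[x, pyB m n, pyC m n]] else ([] : List (List Int)))
      = if n = pvN1 x m then pvE1 x m else [] := by
  intro n hn
  rw [PySem.List.mem_pyRange_one] at hn
  by_cases he : n = pvN1 x m
  · rw [if_pos he]
    subst he
    unfold pvE1
    simp only [pyA, pyB, pyC, pow_two]
    generalize m * m = P
    generalize pvN1 x m * pvN1 x m = Q
    split_ifs with h1 h2 h2 <;> first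
      | rfl
      | (exact h2 ⟨hn.1, hn.2, by omega, h1.2⟩)
      | (exact h1 ⟨by omega, h2.2.2.2⟩)
  · rw [if_neg he, if_neg]
    rintro ⟨hA, -⟩
    apply he
    have hnn : m * m - x = n * n := by simp only [pyA, pow_two] at hA; linarith
    have hpos : m * m > x := by nlinarith [hn.1]
    unfold pvN1
    rw [if_pos hpos, pv_sqrt_key hn.1 hnn]

theorem pv_hf2a (x m : Int) (hm : 1 ≤ m) : ∀ n ∈ PySem.List.pyRange 1 x 1,
    (if pyB m n = x ∧ pyA m n > 0 ∧ pyCoprime (pyA m n) x (pyC m n) = true ∧ ¬ x > pyA m n then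
        [[x, pyA m n, pyC m n]] else ([] : List (List Int)))
      = if n = pvN2 x m then (pvBr2 x m).1 else [] := by
  intro n hn
  rw [PySem.List.mem_pyRange_one] at hn
  by_cases he : n = pvN2 x m
  · rw [if_pos he]
    subst he
    unfold pvBr2
    simp only [pyA, pyB, pyC, pow_two]
    generalize m * m = P
    generalize pvN2 x m * pvN2 x m = Q
    generalize hR : 2 * m * pvN2 x m = R
    split_ifs <;> simp_all <;> omega
  · rw [if_neg he, if_neg]
    rintro ⟨hB, -⟩
    apply he
    have : pvN2 x m = n := by
      unfold pvN2
      exact pv_fd_key hm (by simpa [pyB] using hB)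
    omega

theorem pv_hf2b (x m : Int) (hm : 1 ≤ m) : ∀ n ∈ PySem.List.pyRange 1 x 1,
    fbA x m n = if n = pvN2 x m then (pvBr2 x m).2 else [] := by
  intro n hn
  rw [PySem.List.mem_pyRange_one] at hn
  unfold fbA
  by_cases he : n = pvN2 x m
  · rw [if_pos he]
    subst he
    unfold pvBr2
    simp only [pyA, pyB, pyC, pow_two]
    generalize m * m = P
    generalize pvN2 x m * pvN2 x m = Q
    generalize hR : 2 * m * pvN2 x m = R
    split_ifs <;> simp_all <;> omega
  · rw [if_neg he, if_neg]
    rintro ⟨hB, -⟩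
    apply he
    have : pvN2 x m = n := by
      unfold pvN2
      exact pv_fd_key hm (by simpa [pyB] using hB)
    omega

theorem pv_hf3 (x m : Int) : ∀ n ∈ PySem.List.pyRange 1 x 1,
    fcA x m n = if n = pvN3 x m then pvE3 x m else [] := by
  intro n hn
  rw [PySem.List.mem_pyRange_one] at hn
  unfold fcA
  by_cases he : n = pvN3 x m
  · rw [if_pos he]
    subst he
    unfold pvE3
    simp only [pyA, pyB, pyC, pow_two]
    generalize m * m = P
    generalize pvN3 x m * pvN3 x m = Q
    split_ifs <;> simp_all <;> omega
  · rw [if_neg he, if_neg]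
    rintro ⟨hC, hpos, -⟩
    apply he
    have hnn : x - m * m = n * n := by simp only [pyC, pow_two] at hC; linarith
    have hx : x > m * m := by nlinarith [hn.1]
    unfold pvN3
    rw [if_pos hx, pv_sqrt_key hn.1 hnn]

-- collapsing 'if key ∈ range' around B's guarded emissions
theorem pv_e1_collapse (x m : Int) :
    (if pvN1 x m ∈ PySem.List.pyRange 1 x 1 then pvE1 x m else []) = pvE1 x m := by
  split_ifs with h
  · rfl
  · rw [PySem.List.mem_pyRange_one] at h
    unfold pvE1
    rw [if_neg]
    intro hc
    exact h ⟨hc.1, hc.2.1⟩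

theorem pv_br2_collapse1 (x m : Int) :
    (if pvN2 x m ∈ PySem.List.pyRange 1 x 1 then (pvBr2 x m).1 else []) = (pvBr2 x m).1 := by
  split_ifs with h
  · rfl
  · rw [PySem.List.mem_pyRange_one] at h
    unfold pvBr2
    rw [if_neg (by intro hc; exact h ⟨hc.1, hc.2.1⟩)]

theorem pv_br2_collapse2 (x m : Int) :
    (if pvN2 x m ∈ PySem.List.pyRange 1 x 1 then (pvBr2 x m).2 else []) = (pvBr2 x m).2 := by
  split_ifs with h
  · rfl
  · rw [PySem.List.mem_pyRange_one] at h
    unfold pvBr2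
    rw [if_neg (by intro hc; exact h ⟨hc.1, hc.2.1⟩)]

theorem pv_e3_collapse (x m : Int) :
    (if pvN3 x m ∈ PySem.List.pyRange 1 x 1 then pvE3 x m else []) = pvE3 x m := by
  split_ifs with h
  · rfl
  · rw [PySem.List.mem_pyRange_one] at h
    unfold pvE3
    rw [if_neg]
    intro hc
    exact h ⟨hc.1, hc.2.1⟩

-- per-m equality of the scanned emissions with B's solved closed forms
theorem pv_core_a (x m : Int) (hm : 1 ≤ m) :
    (PySem.List.pyRange 1 x 1).flatMap (faA x m) = (pvAltBody x m).1 := by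
  have hf : ∀ n ∈ PySem.List.pyRange 1 x 1,
      faA x m n = (if n = pvN1 x m then pvE1 x m else [])
        ++ (if n = pvN2 x m then (pvBr2 x m).1 else []) := by
    intro n hn
    unfold faA
    rw [pv_hf1 x m n hn, pv_hf2a x m hm n hn]
  by_cases hord : pvN1 x m ≤ pvN2 x m
  · rw [pv_flatMap_pair _ (PySem.List.pairwise_lt_pyRange_one 1 x) _ _ hord _ _ _ hf,
      pv_e1_collapse, pv_br2_collapse1]
    show _ = if pvE1 x m ≠ [] ∧ (pvBr2 x m).1 ≠ [] ∧ pvN2 x m < pvN1 x m then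
        (pvBr2 x m).1 ++ pvE1 x m else pvE1 x m ++ (pvBr2 x m).1
    rw [if_neg (fun hc => absurd hc.2.2 (by omega))]
  · have hne : pvN1 x m ≠ pvN2 x m := by omega
    have hf' : ∀ n ∈ PySem.List.pyRange 1 x 1,
        faA x m n = (if n = pvN2 x m then (pvBr2 x m).1 else [])
          ++ (if n = pvN1 x m then pvE1 x m else []) := by
      intro n hn
      rw [hf n hn]
      by_cases h1 : n = pvN1 x m <;> by_cases h2 : n = pvN2 x m <;> simp_all
    rw [pv_flatMap_pair _ (PySem.List.pairwise_lt_pyRange_one 1 x) _ _ (by omega : pvN2 x m ≤ pvN1 x m) _ _ _ hf',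
      pv_e1_collapse, pv_br2_collapse1]
    show _ = if pvE1 x m ≠ [] ∧ (pvBr2 x m).1 ≠ [] ∧ pvN2 x m < pvN1 x m then
        (pvBr2 x m).1 ++ pvE1 x m else pvE1 x m ++ (pvBr2 x m).1
    by_cases h1 : pvE1 x m = []
    · rw [if_neg (by intro hc; exact hc.1 h1)]
      simp [h1]
    · by_cases h2 : (pvBr2 x m).1 = []
      · rw [if_neg (by intro hc; exact hc.2.1 h2)]
        simp [h2]
      · rw [if_pos ⟨h1, h2, by omega⟩]

theorem pv_core_b (x m : Int) (hm : 1 ≤ m) :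
    (PySem.List.pyRange 1 x 1).flatMap (fbA x m) = (pvAltBody x m).2.1 := by
  rw [pv_flatMap_single _ (PySem.List.pairwise_lt_pyRange_one 1 x) _ _ _ (pv_hf2b x m hm),
    pv_br2_collapse2]
  rfl

theorem pv_core_c (x m : Int) :
    (PySem.List.pyRange 1 x 1).flatMap (fcA x m) = (pvAltBody x m).2.2 := by
  rw [pv_flatMap_single _ (PySem.List.pairwise_lt_pyRange_one 1 x) _ _ _ (pv_hf3 x m),
    pv_e3_collapse]
  rfl

-- A's nested folds in flatMap form
theorem pv_stepA_eq (x m : Int) :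
    (fun (ab : List (List Int) × List (List Int)) n =>
        let at_ := pyA m n
        let bt := pyB m n
        let ct := pyC m n
        let ab := if at_ = x ∧ pyCoprime x bt ct = true then (ab.1 ++ [[x, bt, ct]], ab.2) else ab
        if bt = x ∧ at_ > 0 ∧ pyCoprime at_ x ct = true then
          if x > at_ then (ab.1, ab.2 ++ [[at_, x, ct]])
          else (ab.1 ++ [[x, at_, ct]], ab.2)
        else ab)
      = fun ab n => (ab.1 ++ faA x m n, ab.2 ++ fbA x m n) := by
  funext ab n
  simp only [faA, fbA]
  split_ifs <;> simp_all

theorem pv_stepC_eq (x m : Int) :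
    (fun (c : List (List Int)) n =>
        let at_ := pyA m n
        let bt := pyB m n
        let ct := pyC m n
        if ct = x ∧ at_ > 0 ∧ pyCoprime at_ bt x = true then c ++ [[at_, bt, x]] else c)
      = fun c n => c ++ fcA x m n := by
  funext c n
  simp only [fcA]
  split_ifs <;> simp

theorem pv_A_flat (x : Int) :
    find_triplets_naive x
      = (PySem.List.pyRange 1 x 1).flatMap (fun m => (PySem.List.pyRange 1 x 1).flatMap (faA x m))
        ++ (PySem.List.pyRange 1 x 1).flatMap (fun m => (PySem.List.pyRange 1 x 1).flatMap (fbA x m))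
        ++ (PySem.List.pyRange 1 x 1).flatMap (fun m => (PySem.List.pyRange 1 x 1).flatMap (fcA x m)) := by
  unfold find_triplets_naive
  have h1 : ∀ (init : List (List Int) × List (List Int)),
      (PySem.List.pyRange 1 x 1).foldl (fun ab m =>
        (PySem.List.pyRange 1 x 1).foldl
          (fun (ab : List (List Int) × List (List Int)) n =>
            let at_ := pyA m n
            let bt := pyB m n
            let ct := pyC m n
            let ab := if at_ = x ∧ pyCoprime x bt ct = true then (ab.1 ++ [[x, bt, ct]], ab.2) else ab
            if bt = x ∧ at_ > 0 ∧ pyCoprime at_ x ct = true then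
              if x > at_ then (ab.1, ab.2 ++ [[at_, x, ct]])
              else (ab.1 ++ [[x, at_, ct]], ab.2)
            else ab)
          ab) init
      = (init.1 ++ (PySem.List.pyRange 1 x 1).flatMap (fun m => (PySem.List.pyRange 1 x 1).flatMap (faA x m)),
         init.2 ++ (PySem.List.pyRange 1 x 1).flatMap (fun m => (PySem.List.pyRange 1 x 1).flatMap (fbA x m))) := by
    intro init
    have : (fun (ab : List (List Int) × List (List Int)) m =>
        (PySem.List.pyRange 1 x 1).foldl
          (fun (ab : List (List Int) × List (List Int)) n =>
            let at_ := pyA m n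
            let bt := pyB m n
            let ct := pyC m n
            let ab := if at_ = x ∧ pyCoprime x bt ct = true then (ab.1 ++ [[x, bt, ct]], ab.2) else ab
            if bt = x ∧ at_ > 0 ∧ pyCoprime at_ x ct = true then
              if x > at_ then (ab.1, ab.2 ++ [[at_, x, ct]])
              else (ab.1 ++ [[x, at_, ct]], ab.2)
            else ab)
          ab)
        = fun ab m => (ab.1 ++ (PySem.List.pyRange 1 x 1).flatMap (faA x m),
                        ab.2 ++ (PySem.List.pyRange 1 x 1).flatMap (fbA x m)) := by
      funext ab m
      rw [pv_stepA_eq x m]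
      exact pv_foldl_pair _ _ _ ab.1 ab.2
    rw [this]
    exact pv_foldl_pair _ _ _ init.1 init.2
  have h2 : (PySem.List.pyRange 1 x 1).foldl (fun c m =>
      (PySem.List.pyRange 1 x 1).foldl
        (fun (c : List (List Int)) n =>
          let at_ := pyA m n
          let bt := pyB m n
          let ct := pyC m n
          if ct = x ∧ at_ > 0 ∧ pyCoprime at_ bt x = true then c ++ [[at_, bt, x]] else c)
        c) ([] : List (List Int))
      = (PySem.List.pyRange 1 x 1).flatMap (fun m => (PySem.List.pyRange 1 x 1).flatMap (fcA x m)) := by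
    have : (fun (c : List (List Int)) m =>
        (PySem.List.pyRange 1 x 1).foldl
          (fun (c : List (List Int)) n =>
            let at_ := pyA m n
            let bt := pyB m n
            let ct := pyC m n
            if ct = x ∧ at_ > 0 ∧ pyCoprime at_ bt x = true then c ++ [[at_, bt, x]] else c)
          c)
        = fun c m => c ++ (PySem.List.pyRange 1 x 1).flatMap (fcA x m) := by
      funext c m
      rw [pv_stepC_eq x m]
      exact PySem.List.foldl_append_eq_flatMap _ _ _
    rw [this, PySem.List.foldl_append_eq_flatMap, List.nil_append]
  rw [h1 ([], []), h2]
  simp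

theorem pv_B_flat (x : Int) :
    find_triplets_naive_alt x
      = (PySem.List.pyRange 1 x 1).flatMap (fun m => (pvAltBody x m).1)
        ++ (PySem.List.pyRange 1 x 1).flatMap (fun m => (pvAltBody x m).2.1)
        ++ (PySem.List.pyRange 1 x 1).flatMap (fun m => (pvAltBody x m).2.2) := by
  unfold find_triplets_naive_alt
  rw [show (fun (s : List (List Int) × List (List Int) × List (List Int)) m =>
        let d := pvAltBody x m
        (s.1 ++ d.1, s.2.1 ++ d.2.1, s.2.2 ++ d.2.2))
      = fun s m => (s.1 ++ (pvAltBody x m).1, s.2.1 ++ (pvAltBody x m).2.1,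
                     s.2.2 ++ (pvAltBody x m).2.2) from rfl]
  rw [pv_foldl_triple]
  simp

theorem pv_main (x : Int) : find_triplets_naive x = find_triplets_naive_alt x := by
  rw [pv_A_flat, pv_B_flat]
  have hmem : ∀ m ∈ PySem.List.pyRange 1 x 1, (1:Int) ≤ m := by
    intro m hm
    exact (PySem.List.mem_pyRange_one.mp hm).1
  rw [List.flatMap_congr (fun m hm => pv_core_a x m (hmem m hm)),
    List.flatMap_congr (fun m hm => pv_core_b x m (hmem m hm)),
    List.flatMap_congr (fun m _ => pv_core_c x m)]

-- ===== VERDICT (by name: the statement is the Claim_ definition above) =====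
theorem find_triplets_naive_spec : Claim_equal_find_triplets_naive := by
  intro x _
  unfold Spec_find_triplets_naive
  exact pv_main x
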